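-- pv_equiv track=rewrite | github.com/jcolinpatrick/kryptos | scripts/transposition/columnar/e_s_53_keyword_columnar_sweep.py | check_period_consistency
-- ===== SOURCE A (Python) =====
-- def check_period_consistency(key_vals, period):
--     """Check how many crib-derived key values are consistent with given period."""
--     residue_vals = {}
--     matches = 0
--     for pos, kv in key_vals:
--         r = pos % period
--         if r in residue_vals:
--             if residue_vals[r] == kv:
--                 matches += 1
--             # Don't increment matches for first occurrence
--         else:
--             residue_vals[r] = kv
--             matches += 1
--     return matches
-- ===== SOURCE B (Python) =====
-- def check_period_consistency(key_vals, period):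
--     """Check how many crib-derived key values are consistent with given period."""
--     groups = {}
--     for pos, kv in key_vals:
--         groups.setdefault(pos % period, []).append(kv)
--     return sum(vals.count(vals[0]) for vals in groups.values())
-- ===== Notes on version B (the rewrite author's own statement) =====
-- stated objective: simpler
-- what changed: Replaces the incremental first-occurrence/equality branching pass over a residue->first-value dict by building a residue->list-of-values grouping dict and then summing, per group, how many values equal the group's first value.
import Mathlib
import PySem

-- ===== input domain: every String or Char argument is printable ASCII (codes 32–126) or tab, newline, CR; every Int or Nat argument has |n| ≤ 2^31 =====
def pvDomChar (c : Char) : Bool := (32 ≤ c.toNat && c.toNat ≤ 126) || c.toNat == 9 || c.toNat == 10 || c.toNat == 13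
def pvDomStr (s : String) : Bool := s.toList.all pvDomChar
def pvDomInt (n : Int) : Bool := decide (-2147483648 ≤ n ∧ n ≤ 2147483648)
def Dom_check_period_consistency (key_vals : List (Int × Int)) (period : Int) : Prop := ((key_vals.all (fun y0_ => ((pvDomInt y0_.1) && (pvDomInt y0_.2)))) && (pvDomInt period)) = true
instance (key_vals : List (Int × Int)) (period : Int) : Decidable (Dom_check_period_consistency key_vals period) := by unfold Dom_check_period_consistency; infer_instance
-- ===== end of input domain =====

-- B replaces A's single incremental pass (first-occurrence/equality branch on a residue -> first-value
-- dict) by a grouping pass (residue -> list of values) followed by a per-group count of the first value.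

-- ===== PORT A =====
-- one loop step of A: r = pos % period; branch on whether r is already a key of residue_vals.
-- 'residue_vals[r]' is ported as 'getD r 0' — exact, since the branch guarantees r is a key.
def cpcStep (period : Int) (st : PySem.Dict Int Int × Int) (p : Int × Int) : PySem.Dict Int Int × Int :=
  let r := PySem.Int.mod p.1 period
  if st.1.contains r then
    (st.1, if st.1.getD r 0 == p.2 then st.2 + 1 else st.2)
  else
    (st.1.insert r p.2, st.2 + 1)

def check_period_consistency (key_vals : List (Int × Int)) (period : Int) : Int :=
  (key_vals.foldl (cpcStep period) (PySem.Dict.empty, 0)).2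

-- ===== PORT B =====
-- one grouping step of B: groups.setdefault(pos % period, []).append(kv)
def cpcGroup (period : Int) (g : PySem.Dict Int (List Int)) (p : Int × Int) : PySem.Dict Int (List Int) :=
  g.modify (PySem.Int.mod p.1 period) [] (fun vs => vs ++ [p.2])

-- vals.count(vals[0]); every group is nonempty, so the .getD 0 default is never used
def cpcCnt (vs : List Int) : Int :=
  (vs.count ((PySem.List.pyGet? vs 0).getD 0) : Int)

def check_period_consistency_alt (key_vals : List (Int × Int)) (period : Int) : Int :=
  ((key_vals.foldl (cpcGroup period) PySem.Dict.empty).values.map cpcCnt).sum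

-- ===== PRECONDITION & SPEC =====
-- Pre_ excludes period = 0 with a nonempty list, where Python's '%' raises ZeroDivisionError.
def Pre_check_period_consistency (key_vals : List (Int × Int)) (period : Int) : Prop :=
  period ≠ 0 ∨ key_vals = []
instance (key_vals : List (Int × Int)) (period : Int) : Decidable (Pre_check_period_consistency key_vals period) := by unfold Pre_check_period_consistency; infer_instance

def pvWitness_check_period_consistency : (List (Int × Int)) × Int := ([(0, 1), (2, 1), (3, 5)], 2)

def Spec_check_period_consistency (key_vals : List (Int × Int)) (period : Int) (out : Int) : Prop := out = check_period_consistency_alt key_vals period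
instance (key_vals : List (Int × Int)) (period : Int) (out : Int) : Decidable (Spec_check_period_consistency key_vals period out) := by unfold Spec_check_period_consistency; infer_instance

-- ===== CLAIM (what is proved, stated in full; the proofs are below) =====
def Claim_equal_check_period_consistency : Prop := ∀ (key_vals : List (Int × Int)) (period : Int), Dom_check_period_consistency key_vals period → Pre_check_period_consistency key_vals period → Spec_check_period_consistency key_vals period (check_period_consistency key_vals period)


-- ===== LEMMAS AND PROOFS =====

-- sum of cpcCnt over the groups, indexed by the key list
def cpcScore (g : PySem.Dict Int (List Int)) : Int :=
  (g.keys.map (fun k => cpcCnt (g.getD k []))).sum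

-- summing a pointwise-updated function over a nodup key list
lemma sum_map_update (K : List Int) (hnd : K.Nodup) (r : Int) (hr : r ∈ K)
    (f g : Int → Int) (hfg : ∀ k, k ≠ r → f k = g k) :
    (K.map f).sum = (K.map g).sum + (f r - g r) := by
  induction K with
  | nil => cases hr
  | cons a K ih =>
    rcases List.mem_cons.mp hr with h | h
    · subst h
      have : K.map f = K.map g := List.map_congr_left (fun k hk => hfg k (by rintro rfl; exact (List.nodup_cons.mp hnd).1 hk))
      simp [this]; ring
    · have ha : a ≠ r := by rintro rfl; exact (List.nodup_cons.mp hnd).1 h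
      simp only [List.map_cons, List.sum_cons, ih (List.nodup_cons.mp hnd).2 h, hfg a ha]
      ring

lemma pyGet?_cons_zero (h : Int) (t : List Int) : PySem.List.pyGet? (h :: t) 0 = some h := by
  simp [PySem.List.pyGet?, PySem.List.pyIdx?]

lemma cpcCnt_append (vs : List Int) (hvs : vs ≠ []) (kv : Int) :
    cpcCnt (vs ++ [kv]) = cpcCnt vs + (if ((PySem.List.pyGet? vs 0).getD 0) == kv then 1 else 0) := by
  obtain ⟨h, t, rfl⟩ := List.exists_cons_of_ne_nil hvs
  have h1 : (h :: t) ++ [kv] = h :: (t ++ [kv]) := rfl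
  rw [h1, cpcCnt, cpcCnt, pyGet?_cons_zero, pyGet?_cons_zero]
  simp only [Option.getD_some, List.count_cons, List.count_append, beq_iff_eq]
  by_cases hk : h = kv
  · subst hk; simp
  · simp [hk, Ne.symm hk]

-- the main invariant: running A's loop from state (d, m) where d records, for each group of g,
-- the first value of that group, and running B's grouping loop from g, keeps m ahead by cpcScore
lemma cpc_main (period : Int) (l : List (Int × Int)) :
    ∀ (g : PySem.Dict Int (List Int)) (d : PySem.Dict Int Int) (m : Int),
    g.keys.Nodup →
    (∀ r, d.contains r = g.contains r) →
    (∀ r, g.contains r = true → d.getD r 0 = (PySem.List.pyGet? (g.getD r []) 0).getD 0) →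
    (∀ r, g.contains r = true → g.getD r [] ≠ []) →
    (l.foldl (cpcStep period) (d, m)).2 = m + cpcScore (l.foldl (cpcGroup period) g) - cpcScore g := by
  induction l with
  | nil => intro g d m _ _ _ _; simp
  | cons p l ih =>
    intro g d m hnd hcont hval hne
    simp only [List.foldl_cons]
    set r := PySem.Int.mod p.1 period with hr
    have hgc : ∀ k, (cpcGroup period g p).contains k = (k == r || g.contains k) :=
      fun k => PySem.Dict.contains_modify g r k [] (fun vs => vs ++ [p.2])
    have hkeysmod : (cpcGroup period g p).keys = (g.insert r (g.getD r [] ++ [p.2])).keys :=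
      PySem.Dict.keys_modify g r [] (fun vs => vs ++ [p.2])
    have hgetD : ∀ k, (cpcGroup period g p).getD k [] =
        if k = r then g.getD r [] ++ [p.2] else g.getD k [] :=
      fun k => PySem.Dict.getD_modify g r k [] (fun vs => vs ++ [p.2])
    by_cases hc : g.contains r = true
    · -- r already a key: A compares with the stored first value, B appends to the group
      have hrk : r ∈ g.keys := (PySem.Dict.contains_iff_mem_keys g r).mp hc
      have hkeys : (cpcGroup period g p).keys = g.keys := by
        rw [hkeysmod, PySem.Dict.keys_insert_of_contains g _ hc]
      have hstep : cpcStep period (d, m) p =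
          (d, if d.getD r 0 == p.2 then m + 1 else m) := by
        simp [cpcStep, hcont r, hc, ← hr]
      rw [hstep]
      rw [ih (cpcGroup period g p) d (if d.getD r 0 == p.2 then m + 1 else m)
          (by rw [hkeys]; exact hnd)
          (by intro k; rw [hgc k, hcont k]
              by_cases hk : k = r <;> simp [hk, hc])
          (by intro k hk
              by_cases hkr : k = r
              · rw [hgetD k, if_pos hkr, hkr, hval r hc]
                obtain ⟨h, t, hvs⟩ := List.exists_cons_of_ne_nil (hne r hc)
                rw [hvs]
                simp
              · rw [hgetD k, if_neg hkr]
                rw [hgc k] at hk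
                exact hval k (by simpa [hkr] using hk))
          (by intro k hk
              by_cases hkr : k = r
              · rw [hgetD k, if_pos hkr]; simp
              · rw [hgetD k, if_neg hkr]
                rw [hgc k] at hk
                exact hne k (by simpa [hkr] using hk))]
      have hscore : cpcScore (cpcGroup period g p) =
          cpcScore g + (if d.getD r 0 == p.2 then 1 else 0) := by
        unfold cpcScore
        rw [hkeys, sum_map_update g.keys hnd r hrk
          (fun k => cpcCnt ((cpcGroup period g p).getD k []))
          (fun k => cpcCnt (g.getD k []))
          (fun k hk => by
            show cpcCnt ((cpcGroup period g p).getD k []) = cpcCnt (g.getD k [])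
            rw [hgetD k, if_neg hk])]
        rw [hgetD r, if_pos rfl, cpcCnt_append _ (hne r hc) p.2, hval r hc]
        ring
      rw [hscore]
      split <;> ring
    · -- r is fresh: A records the first value and counts; B starts a new singleton group
      have hcf : g.contains r = false := by simpa using hc
      have hgr : g.getD r [] = [] := PySem.Dict.getD_of_not_contains g [] hcf
      have hkeys : (cpcGroup period g p).keys = g.keys ++ [r] := by
        rw [hkeysmod, PySem.Dict.keys_insert_of_not_contains g _ hcf]
      have hrnk : r ∉ g.keys := fun hmem => by
        rw [(PySem.Dict.contains_iff_mem_keys g r).mpr hmem] at hcf; cases hcf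
      have hgetD' : ∀ k, (cpcGroup period g p).getD k [] =
          if k = r then [p.2] else g.getD k [] := by
        intro k
        rw [hgetD k, hgr]
        rfl
      have hstep : cpcStep period (d, m) p = (d.insert r p.2, m + 1) := by
        simp [cpcStep, hcont r, hcf, ← hr]
      rw [hstep]
      rw [ih (cpcGroup period g p) (d.insert r p.2) (m + 1)
          (by rw [hkeys]; simp [List.nodup_append, hnd]
              intro a ha hra; exact hrnk (hra ▸ ha))
          (by intro k
              rw [PySem.Dict.contains_insert, hgc k, hcont k])
          (by intro k hk
              by_cases hkr : k = r
              · rw [hgetD' k, if_pos hkr, PySem.Dict.getD_insert, if_pos hkr, pyGet?_cons_zero]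
                rfl
              · rw [hgetD' k, if_neg hkr, PySem.Dict.getD_insert, if_neg hkr]
                rw [hgc k] at hk
                exact hval k (by simpa [hkr] using hk))
          (by intro k hk
              by_cases hkr : k = r
              · rw [hgetD' k, if_pos hkr]; simp
              · rw [hgetD' k, if_neg hkr]
                rw [hgc k] at hk
                exact hne k (by simpa [hkr] using hk))]
      have hscore : cpcScore (cpcGroup period g p) = cpcScore g + 1 := by
        unfold cpcScore
        have hmap : g.keys.map (fun k => cpcCnt ((cpcGroup period g p).getD k [])) =
            g.keys.map (fun k => cpcCnt (g.getD k [])) :=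
          List.map_congr_left (fun k hk => by
            show cpcCnt ((cpcGroup period g p).getD k []) = cpcCnt (g.getD k [])
            rw [hgetD' k, if_neg (fun h => hrnk (by rw [← h]; exact hk))])
        rw [hkeys, List.map_append, List.sum_append, hmap, List.map_singleton,
            hgetD' r, if_pos rfl]
        have : cpcCnt [p.2] = 1 := by
          rw [cpcCnt, pyGet?_cons_zero]
          simp
        rw [this]
        simp
      rw [hscore]; ring

lemma alt_eq_score (key_vals : List (Int × Int)) (period : Int) :
    check_period_consistency_alt key_vals period =
      cpcScore (key_vals.foldl (cpcGroup period) PySem.Dict.empty) := by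
  have hnd : (key_vals.foldl (cpcGroup period) PySem.Dict.empty).keys.Nodup :=
    PySem.Dict.nodup_keys_foldl_modify_key key_vals
      (fun p => PySem.Int.mod p.1 period) [] (fun _ p vs => vs ++ [p.2])
      PySem.Dict.empty PySem.Dict.nodup_keys_empty
  unfold check_period_consistency_alt cpcScore
  rw [PySem.Dict.values_eq_map_keys _ hnd [], List.map_map]
  rfl

-- ===== VERDICT (by name: the statement is the Claim_ definition above) =====
theorem check_period_consistency_spec : Claim_equal_check_period_consistency := by
  intro key_vals period _ _
  unfold Spec_check_period_consistency
  rw [alt_eq_score]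
  unfold check_period_consistency
  rw [cpc_main period key_vals PySem.Dict.empty PySem.Dict.empty 0
      PySem.Dict.nodup_keys_empty
      (by intro k; rw [PySem.Dict.contains_empty, PySem.Dict.contains_empty])
      (by intro k h; rw [PySem.Dict.contains_empty] at h; cases h)
      (by intro k h; rw [PySem.Dict.contains_empty] at h; cases h)]
  simp [cpcScore, PySem.Dict.keys_empty]
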